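-- pv_equiv track=rewrite | github.com/IolandaManzali/litellm | litellm/proxy/hooks/presidio_pii_masking.py | ensure_mask_text_uniqueness
-- ===== SOURCE A (Python) =====
-- def ensure_mask_text_uniqueness(items):
--     mask_texts = {}
--     results = []
--     for item in items:
--         entity_type = item["entity_type"]
--         if entity_type not in mask_texts:
--             mask_texts[entity_type] = 0
--         else:
--             mask_texts[entity_type] += 1
--
--         results.append({**item, "text": f"<{entity_type}-{mask_texts[entity_type]}>"})
--
--     return results
-- ===== SOURCE B (Python) =====
-- def ensure_mask_text_uniqueness(items):
--     positions = {}
--     for i, item in enumerate(items):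
--         positions.setdefault(item["entity_type"], []).append(i)
--     results = [None] * len(items)
--     for entity_type, idxs in positions.items():
--         for n, i in enumerate(idxs):
--             results[i] = {**items[i], "text": f"<{entity_type}-{n}>"}
--     return results
-- ===== Notes on version B (the rewrite author's own statement) =====
-- stated objective: alternative
-- what changed: Replaces A's single pass with a running per-type counter by a two-phase group-by: a first pass builds a table entity_type -> ordered list of original indices, and a second pass enumerates each group to number its occurrences and writes the masked items into a pre-sized results array at their original indices.
import Mathlib
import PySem

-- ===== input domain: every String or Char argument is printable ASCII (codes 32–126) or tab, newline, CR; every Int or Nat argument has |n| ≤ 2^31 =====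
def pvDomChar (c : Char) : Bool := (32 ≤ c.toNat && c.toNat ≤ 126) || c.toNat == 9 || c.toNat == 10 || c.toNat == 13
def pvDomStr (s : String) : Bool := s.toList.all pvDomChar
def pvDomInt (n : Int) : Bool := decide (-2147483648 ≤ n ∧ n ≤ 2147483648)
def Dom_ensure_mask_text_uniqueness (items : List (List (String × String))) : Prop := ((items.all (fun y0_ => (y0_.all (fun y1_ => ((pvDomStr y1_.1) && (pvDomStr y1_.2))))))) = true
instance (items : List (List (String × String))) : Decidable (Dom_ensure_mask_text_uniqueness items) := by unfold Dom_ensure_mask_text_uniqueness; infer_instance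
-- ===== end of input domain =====

-- B replaces A's single pass with a running per-type counter by a two-phase group-by:
-- first pass groups the original indices by entity_type, second pass enumerates each
-- group and writes the masked items into a pre-sized results array by original index.
-- Alternative decomposition, same cost. Return-value equivalence only (neither mutates
-- its argument).

-- shared formatting/merge helpers (both Pythons evaluate these same expressions)
-- item["entity_type"] read through the dict the assoc list denotes (last value wins, as
-- Python's dict); total via a "" default, guarded by Pre_ (Python raises KeyError when
-- the key is missing)
def pvEntityType (item : List (String × String)) : String :=
  (PySem.Dict.ofList item).getD "entity_type" ""

-- {**item, "text": v} : the dict item denotes, with "text" overwritten in place / appended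
def pvWithText (item : List (String × String)) (v : String) : List (String × String) :=
  ((PySem.Dict.ofList item).insert "text" v).items

-- f"<{t}-{n}>"
def pvMask (t : String) (n : Int) : String :=
  "<" ++ t ++ "-" ++ PySem.Int.toStr n ++ ">"

-- ===== PORT A =====
-- the loop body of A: update mask_texts for this item's entity_type, append the masked item
def pvStepA (st : PySem.Dict String Int × List (List (String × String)))
    (item : List (String × String)) : PySem.Dict String Int × List (List (String × String)) :=
  let entity_type := pvEntityType item
  let mask_texts :=
    if st.1.contains entity_type = false then st.1.insert entity_type 0
    else st.1.modify entity_type 0 (· + 1)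
  (mask_texts, st.2 ++ [pvWithText item (pvMask entity_type (mask_texts.getD entity_type 0))])

def ensure_mask_text_uniqueness (items : List (List (String × String))) : List (List (String × String)) :=
  (items.foldl pvStepA (PySem.Dict.empty, [])).2

-- ===== PORT B =====
-- enumerate(xs) (every index produced here is a nonnegative position, so Nat indices)
def pvIdxFrom {α : Type} (s : Nat) : List α → List (Nat × α)
  | [] => []
  | a :: l => (s, a) :: pvIdxFrom (s + 1) l

-- Source B: first pass positions.setdefault(t, []).append(i); results = [None]*len(items)
-- (the never-observed None placeholder is rendered as []: every slot is overwritten);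
-- second pass writes {**items[i], "text": f"<{t}-{n}>"} at index i.
def ensure_mask_text_uniqueness_alt (items : List (List (String × String))) : List (List (String × String)) :=
  let positions : PySem.Dict String (List Nat) :=
    (pvIdxFrom 0 items).foldl
      (fun d p => d.modify (pvEntityType p.2) [] (· ++ [p.1])) PySem.Dict.empty
  let results : List (List (String × String)) := List.replicate items.length []
  positions.items.foldl
    (fun res g =>
      (pvIdxFrom 0 g.2).foldl
        (fun res q => res.set q.2 (pvWithText (items.getD q.2 []) (pvMask g.1 (q.1 : Int))))
        res)
    results

-- ===== PRECONDITION & SPEC =====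
-- Pre_ excludes exactly the inputs where some item lacks the key "entity_type": there the
-- Python A (and B) raise KeyError instead of returning.
def Pre_ensure_mask_text_uniqueness (items : List (List (String × String))) : Prop :=
  (items.all (fun item => item.any (fun kv => kv.1 == "entity_type"))) = true
instance (items : List (List (String × String))) : Decidable (Pre_ensure_mask_text_uniqueness items) := by unfold Pre_ensure_mask_text_uniqueness; infer_instance

def pvWitness_ensure_mask_text_uniqueness : (List (List (String × String))) :=
  [[("entity_type", "PERSON"), ("text", "bob")], [("entity_type", "PERSON")], [("entity_type", "EMAIL")]]

def Spec_ensure_mask_text_uniqueness (items : List (List (String × String))) (out : List (List (String × String))) : Prop := out = ensure_mask_text_uniqueness_alt items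
instance (items : List (List (String × String))) (out : List (List (String × String))) : Decidable (Spec_ensure_mask_text_uniqueness items out) := by unfold Spec_ensure_mask_text_uniqueness; infer_instance

-- ===== CLAIM (what is proved, stated in full; the proofs are below) =====
def Claim_equal_ensure_mask_text_uniqueness : Prop := ∀ (items : List (List (String × String))), Dom_ensure_mask_text_uniqueness items → Pre_ensure_mask_text_uniqueness items → Spec_ensure_mask_text_uniqueness items (ensure_mask_text_uniqueness items)

-- ===== LEMMAS AND PROOFS =====

-- the entity type of the item at position i, and the masked item both programs produce there
def pvTy (items : List (List (String × String))) (i : Nat) : String :=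
  pvEntityType (items.getD i [])

def pvCnt (items : List (List (String × String))) (j : Nat) : Nat :=
  ((List.range j).filter (fun i => pvTy items i == pvTy items j)).length

def pvTgt (items : List (List (String × String))) (j : Nat) : List (String × String) :=
  pvWithText (items.getD j []) (pvMask (pvTy items j) ((pvCnt items j : Nat) : Int))

-- enumerate as a map over range
lemma pvIdxFrom_eq {α : Type} (d : α) : ∀ (l : List α) (s : Nat),
    pvIdxFrom s l = (List.range l.length).map (fun i => (s + i, l.getD i d)) := by
  intro l
  induction l with
  | nil => intro s; simp [pvIdxFrom]
  | cons a l ih =>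
    intro s
    rw [pvIdxFrom, ih (s + 1)]
    simp [List.range_succ_eq_map, List.map_map, Function.comp_def, Nat.add_assoc, Nat.add_comm 1]

-- the straight-line recursion A computes (kept from the A-side proof)
def pvGo (seen : List String) : List (List (String × String)) → List (List (String × String))
  | [] => []
  | item :: rest =>
      pvWithText item (pvMask (pvEntityType item) ((seen.count (pvEntityType item) : Nat) : Int))
        :: pvGo (seen ++ [pvEntityType item]) rest

lemma go_eq_map (its : List (List (String × String))) (seen : List String) :
    pvGo seen its = (List.range its.length).map (fun j =>
      pvWithText (its.getD j []) (pvMask (pvEntityType (its.getD j []))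
        (((seen ++ (its.take j).map pvEntityType).count (pvEntityType (its.getD j [])) : Nat) : Int))) := by
  induction its generalizing seen with
  | nil => simp [pvGo]
  | cons a l ih =>
    rw [pvGo, ih (seen ++ [pvEntityType a])]
    simp only [List.length_cons, List.range_succ_eq_map, List.map_cons, List.map_map]
    congr 1
    · simp
    · apply List.map_congr_left
      intro j hj
      simp [List.count_append]

lemma fold_eq_go (its : List (List (String × String))) (seen : List String)
    (d : PySem.Dict String Int) (res : List (List (String × String)))
    (hc : ∀ t, d.contains t = true ↔ t ∈ seen)
    (hg : ∀ t, t ∈ seen → d.getD t 0 = (seen.count t : Int) - 1) :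
    (its.foldl pvStepA (d, res)).2 = res ++ pvGo seen its := by
  induction its generalizing seen d res with
  | nil => simp [pvGo]
  | cons item rest ih =>
    rw [List.foldl_cons]
    by_cases hmem : pvEntityType item ∈ seen
    · have hcontains : d.contains (pvEntityType item) = true := (hc _).2 hmem
      have hstep : pvStepA (d, res) item
          = (d.modify (pvEntityType item) 0 (· + 1),
             res ++ [pvWithText item (pvMask (pvEntityType item) ((seen.count (pvEntityType item) : Nat) : Int))]) := by
        simp only [pvStepA, hcontains, Bool.true_eq_false, if_false]
        rw [PySem.Dict.getD_modify_self, hg _ hmem]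
        norm_num
      have hc' : ∀ s, (d.modify (pvEntityType item) 0 (· + 1)).contains s = true
          ↔ s ∈ seen ++ [pvEntityType item] := by
        intro s
        rw [PySem.Dict.contains_modify]
        simp [hc s]
        tauto
      have hg' : ∀ s, s ∈ seen ++ [pvEntityType item] →
          (d.modify (pvEntityType item) 0 (· + 1)).getD s 0
            = (((seen ++ [pvEntityType item]).count s : Nat) : Int) - 1 := by
        intro s hs
        rw [PySem.Dict.getD_modify]
        by_cases hst : s = pvEntityType item
        · subst hst
          rw [if_pos rfl, hg _ hmem]
          simp [List.count_append]
        · have hst' : ¬ pvEntityType item = s := fun h => hst h.symm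
          rw [if_neg hst]
          have hsmem : s ∈ seen := by
            rcases List.mem_append.1 hs with h | h
            · exact h
            · exact absurd (List.mem_singleton.1 h) hst
          rw [hg _ hsmem]
          have : List.count s [pvEntityType item] = 0 := by
            simp [hst']
          simp [List.count_append, this]
      rw [hstep, ih (seen ++ [pvEntityType item]) _ _ hc' hg']
      simp [pvGo]
    · have hcontains : d.contains (pvEntityType item) = false := by
        rcases Bool.eq_false_or_eq_true (d.contains (pvEntityType item)) with h | h
        · exact absurd ((hc _).1 h) hmem
        · exact h
      have hcount0 : seen.count (pvEntityType item) = 0 := List.count_eq_zero.2 hmem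
      have hstep : pvStepA (d, res) item
          = (d.insert (pvEntityType item) 0,
             res ++ [pvWithText item (pvMask (pvEntityType item) ((seen.count (pvEntityType item) : Nat) : Int))]) := by
        simp only [pvStepA, hcontains, if_pos]
        rw [PySem.Dict.getD_insert_self, hcount0]
        norm_num
      have hc' : ∀ s, (d.insert (pvEntityType item) 0).contains s = true
          ↔ s ∈ seen ++ [pvEntityType item] := by
        intro s
        rw [PySem.Dict.contains_insert]
        simp [hc s]
        tauto
      have hg' : ∀ s, s ∈ seen ++ [pvEntityType item] →
          (d.insert (pvEntityType item) 0).getD s 0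
            = (((seen ++ [pvEntityType item]).count s : Nat) : Int) - 1 := by
        intro s hs
        rw [PySem.Dict.getD_insert]
        by_cases hst : s = pvEntityType item
        · subst hst
          rw [if_pos rfl]
          simp [List.count_append, hcount0]
        · have hst' : ¬ pvEntityType item = s := fun h => hst h.symm
          rw [if_neg hst]
          have hsmem : s ∈ seen := by
            rcases List.mem_append.1 hs with h | h
            · exact h
            · exact absurd (List.mem_singleton.1 h) hst
          rw [hg _ hsmem]
          have : List.count s [pvEntityType item] = 0 := by
            simp [hst']
          simp [List.count_append, this]
      rw [hstep, ih (seen ++ [pvEntityType item]) _ _ hc' hg']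
      simp [pvGo]

-- ===== filtered-range rank fact: the position of index i within its group is the
-- number of earlier indices of the same kind =====

lemma filter_range_rank (P : Nat → Bool) : ∀ (n i : Nat), i < n → P i = true →
    ((List.range i).filter P).length < ((List.range n).filter P).length ∧
    ((List.range n).filter P).getD (((List.range i).filter P).length) 0 = i := by
  intro n
  induction n with
  | zero => intro i hi; omega
  | succ n ih =>
    intro i hi hPi
    rw [List.range_succ, List.filter_append]
    rcases Nat.lt_or_ge i n with h | h
    · obtain ⟨h1, h2⟩ := ih i h hPi
      refine ⟨?_, ?_⟩
      · calc ((List.range i).filter P).length < ((List.range n).filter P).length := h1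
          _ ≤ (((List.range n).filter P) ++ List.filter P [n]).length := by
              simp [List.length_append]
      · rw [List.getD_append _ _ _ _ h1]; exact h2
    · have hi' : i = n := by omega
      subst hi'
      simp only [List.filter_cons, hPi, if_pos, List.filter_nil]
      constructor
      · simp
      · simp [List.getD_eq_getElem?_getD]

-- ===== set-fold facts =====

lemma foldl_set_length {α : Type} (W : List (Nat × α)) (res : List α) :
    (W.foldl (fun r p => r.set p.1 p.2) res).length = res.length := by
  induction W generalizing res with
  | nil => rfl
  | cons w W ih => simp [List.foldl_cons, ih]

lemma foldl_set_getD_not_mem {α : Type} (W : List (Nat × α)) (res : List α) (j : Nat) (d : α)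
    (h : ∀ p ∈ W, p.1 ≠ j) :
    (W.foldl (fun r p => r.set p.1 p.2) res).getD j d = res.getD j d := by
  induction W generalizing res with
  | nil => rfl
  | cons w W ih =>
    rw [List.foldl_cons, ih _ (fun p hp => h p (List.mem_cons_of_mem _ hp))]
    simp [List.getD_eq_getElem?_getD, List.getElem?_set_ne (h w (List.mem_cons_self))]

lemma foldl_set_getD_mem {α : Type} (W : List (Nat × α)) (res : List α) (j : Nat) (v d : α)
    (hj : j < res.length) (hmem : (j, v) ∈ W) (hnd : (W.map Prod.fst).Nodup) :
    (W.foldl (fun r p => r.set p.1 p.2) res).getD j d = v := by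
  induction W generalizing res with
  | nil => exact absurd hmem (List.not_mem_nil)
  | cons w W ih =>
    rw [List.map_cons, List.nodup_cons] at hnd
    rcases List.mem_cons.1 hmem with h | h
    · subst h
      rw [List.foldl_cons]
      rw [foldl_set_getD_not_mem _ _ _ _
        (fun p hp hpj => hnd.1 (by simpa [hpj] using List.mem_map_of_mem (f := Prod.fst) hp))]
      simp [List.getD_eq_getElem?_getD, hj]
    · rw [List.foldl_cons]
      exact ih (res.set w.1 w.2) (by simpa using hj) h hnd.2

-- lists as maps over their index range
lemma take_eq_map_range {α : Type} (l : List α) (d : α) (j : Nat) (hj : j ≤ l.length) :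
    l.take j = (List.range j).map (fun i => l.getD i d) := by
  apply List.ext_getElem
  · simp [Nat.min_eq_left hj]
  · intro i h1 h2
    simp only [List.getElem_take, List.getElem_map, List.getElem_range]
    rw [List.getD_eq_getElem]

lemma map_getD_range {α : Type} (l : List α) (d : α) :
    (List.range l.length).map (fun i => l.getD i d) = l := by
  apply List.ext_getElem
  · simp
  · intro i h1 h2
    simp only [List.getElem_map, List.getElem_range]
    rw [List.getD_eq_getElem]

-- A equals the range-map of pvTgt
lemma a_eq_map (items : List (List (String × String))) :
    ensure_mask_text_uniqueness items = (List.range items.length).map (pvTgt items) := by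
  unfold ensure_mask_text_uniqueness
  have ha := fold_eq_go items [] PySem.Dict.empty []
    (by simp [PySem.Dict.contains_empty]) (by simp)
  rw [ha, List.nil_append, go_eq_map]
  apply List.map_congr_left
  intro j hj
  rw [List.mem_range] at hj
  unfold pvTgt pvCnt pvTy
  congr 2
  rw [List.nil_append, take_eq_map_range items [] j (Nat.le_of_lt hj), List.map_map,
    List.count_eq_countP, List.countP_map, List.countP_eq_length_filter]
  rfl

-- ===== the group table B builds =====

def pvGrp (items : List (List (String × String))) (t : String) : List Nat :=
  (List.range items.length).filter (fun i => pvTy items i == t)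

def pvPositions (items : List (List (String × String))) : PySem.Dict String (List Nat) :=
  (pvIdxFrom 0 items).foldl
    (fun d p => d.modify (pvEntityType p.2) [] (· ++ [p.1])) PySem.Dict.empty

lemma positions_getD (items : List (List (String × String))) (t : String) :
    (pvPositions items).getD t [] = pvGrp items t := by
  unfold pvPositions
  have h1 : ((pvIdxFrom 0 items).map (fun p => (pvEntityType p.2, p.1))).foldl
        (fun d q => d.modify q.1 [] (· ++ [q.2])) PySem.Dict.empty
      = (pvIdxFrom 0 items).foldl
          (fun d p => d.modify (pvEntityType p.2) [] (· ++ [p.1])) PySem.Dict.empty := by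
    rw [List.foldl_map]
  rw [← h1, PySem.Dict.getD_foldl_modify_append, PySem.Dict.getD_empty, List.nil_append]
  rw [pvIdxFrom_eq [], List.map_map, List.filter_map, List.map_map]
  unfold pvGrp pvTy
  simp [Function.comp_def]

lemma positions_nodup_keys (items : List (List (String × String))) :
    (pvPositions items).keys.Nodup := by
  exact PySem.Dict.nodup_keys_foldl_modify_key (pvIdxFrom 0 items)
    (fun p => pvEntityType p.2) ([] : List Nat) (fun _ p => (· ++ [p.1]))
    PySem.Dict.empty PySem.Dict.nodup_keys_empty

lemma mem_grp (items : List (List (String × String))) (t : String) (i : Nat)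
    (h : i ∈ pvGrp items t) : pvTy items i = t ∧ i < items.length := by
  unfold pvGrp at h
  rcases List.mem_filter.1 h with ⟨h1, h2⟩
  exact ⟨by simpa using h2, List.mem_range.1 h1⟩

lemma grp_self_mem (items : List (List (String × String))) (j : Nat) (hj : j < items.length) :
    j ∈ pvGrp items (pvTy items j) := by
  unfold pvGrp
  exact List.mem_filter.2 ⟨List.mem_range.2 hj, by simp⟩

lemma positions_items_val (items : List (List (String × String))) (t : String)
    (g : List Nat) (h : (t, g) ∈ (pvPositions items).items) : g = pvGrp items t := by
  have := PySem.Dict.getD_of_mem_items _ h (positions_nodup_keys items) []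
  rw [positions_getD] at this
  exact this.symm

lemma positions_items_mem (items : List (List (String × String))) (j : Nat)
    (hj : j < items.length) :
    (pvTy items j, pvGrp items (pvTy items j)) ∈ (pvPositions items).items := by
  have hget : (pvPositions items).get? (pvTy items j) = some (pvGrp items (pvTy items j)) := by
    have hcon : (pvPositions items).contains (pvTy items j) = true := by
      by_contra hc
      have hc' : (pvPositions items).contains (pvTy items j) = false := by
        rcases Bool.eq_false_or_eq_true ((pvPositions items).contains (pvTy items j)) with h | h
        · exact absurd h hc
        · exact h
      have h0 := PySem.Dict.getD_of_not_contains (pvPositions items) ([] : List Nat) hc'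
      rw [positions_getD] at h0
      have := grp_self_mem items j hj
      rw [h0] at this
      exact List.not_mem_nil this
    have hsome : ((pvPositions items).get? (pvTy items j)).isSome := by
      rw [← PySem.Dict.contains_eq_isSome_get?]; exact hcon
    rcases Option.isSome_iff_exists.1 hsome with ⟨v, hv⟩
    have := PySem.Dict.getD_of_get?_eq_some _ ([] : List Nat) hv
    rw [positions_getD] at this
    rw [hv, this]
  exact PySem.Dict.mem_items_of_get?_eq_some _ hget

-- membership in the enumeration of a group
lemma mem_pvIdxFrom_grp (items : List (List (String × String))) (j : Nat)
    (hj : j < items.length) :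
    (pvCnt items j, j) ∈ pvIdxFrom 0 (pvGrp items (pvTy items j)) := by
  rw [pvIdxFrom_eq 0]
  have h := filter_range_rank (fun i => pvTy items i == pvTy items j) items.length j hj (by simp)
  refine List.mem_map.2 ⟨pvCnt items j, List.mem_range.2 ?_, ?_⟩
  · exact h.1
  · have : (pvGrp items (pvTy items j)).getD (pvCnt items j) 0 = j := h.2
    rw [this]
    simp

-- B equals the range-map of pvTgt
lemma b_eq_map (items : List (List (String × String))) :
    ensure_mask_text_uniqueness_alt items = (List.range items.length).map (pvTgt items) := by
  have hW : ensure_mask_text_uniqueness_alt items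
      = ((pvPositions items).items.flatMap
          (fun g => (pvIdxFrom 0 g.2).map
            (fun q => (q.2, pvWithText (items.getD q.2 []) (pvMask g.1 (q.1 : Int)))))).foldl
          (fun r w => r.set w.1 w.2) (List.replicate items.length []) := by
    unfold ensure_mask_text_uniqueness_alt
    rw [List.foldl_flatMap]
    simp only [List.foldl_map]
    rfl
  rw [hW]
  set W := (pvPositions items).items.flatMap
      (fun g => (pvIdxFrom 0 g.2).map
        (fun q => (q.2, pvWithText (items.getD q.2 []) (pvMask g.1 (q.1 : Int))))) with hWdef
  have hfst : W.map Prod.fst = (pvPositions items).items.flatMap (fun g => g.2) := by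
    rw [hWdef, List.map_flatMap]
    apply List.flatMap_congr  -- congruence over the list
    intro g hg
    rw [List.map_map]
    have : (Prod.fst ∘ fun q : Nat × Nat =>
        (q.2, pvWithText (items.getD q.2 []) (pvMask g.1 (q.1 : Int)))) = (·.2) := rfl
    rw [this, pvIdxFrom_eq 0]
    simp only [List.map_map]
    have : ((fun q : Nat × Nat => q.2) ∘ fun i => (0 + i, (g.2).getD i 0))
        = fun i => (g.2).getD i 0 := rfl
    rw [this, map_getD_range]
  have hnd : (W.map Prod.fst).Nodup := by
    rw [hfst]
    rw [List.nodup_flatMap]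
    constructor
    · intro g hg
      rw [positions_items_val items g.1 g.2 (by simpa using hg)]
      exact List.Nodup.filter _ (List.nodup_range)
    · have hkeys := positions_nodup_keys items
      have : (pvPositions items).keys = (pvPositions items).items.map Prod.fst := by
        simp [PySem.Dict.keys]
      rw [this, List.Nodup, List.pairwise_map] at hkeys
      apply List.Pairwise.imp_of_mem (l := (pvPositions items).items) ?_ hkeys
      intro g g' hg hg' hne i hi hi'
      have hi2 : i ∈ g.2 := hi
      have hi2' : i ∈ g'.2 := hi'
      rw [positions_items_val items g.1 g.2 (by simpa using hg)] at hi2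
      rw [positions_items_val items g'.1 g'.2 (by simpa using hg')] at hi2'
      exact hne ((mem_grp items g.1 i hi2).1 ▸ (mem_grp items g'.1 i hi2').1)
  apply List.ext_getElem
  · rw [foldl_set_length]
    simp
  · intro j h1 h2
    have h1' : j < items.length := by
      rw [foldl_set_length, List.length_replicate] at h1; exact h1
    have hmem : (j, pvTgt items j) ∈ W := by
      rw [hWdef]
      apply List.mem_flatMap.2
      refine ⟨(pvTy items j, pvGrp items (pvTy items j)), positions_items_mem items j h1', ?_⟩
      apply List.mem_map.2
      exact ⟨(pvCnt items j, j), mem_pvIdxFrom_grp items j h1', rfl⟩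
    have hget := foldl_set_getD_mem W (List.replicate items.length []) j (pvTgt items j) []
      (by simpa using h1') hmem hnd
    have hL := List.getD_eq_getElem
      (W.foldl (fun r w => r.set w.1 w.2) (List.replicate items.length []))
      ([] : List (String × String)) h1
    rw [← hL, hget, List.getElem_map, List.getElem_range]

-- ===== VERDICT (by name: the statement is the Claim_ definition above) =====
theorem ensure_mask_text_uniqueness_spec : Claim_equal_ensure_mask_text_uniqueness := by
  intro items _ _
  unfold Spec_ensure_mask_text_uniqueness
  rw [a_eq_map, b_eq_map]
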